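-- pv_equiv track=rewrite | github.com/efekaraduman/Prompt-Sentinel | app/mutation.py | _apply_synonyms
-- ===== SOURCE A (Python) =====
-- _SYNONYM_MAP: dict[str, list[str]] = {
--     "tell": ["reveal", "disclose", "share", "output", "show"],
--     "show": ["display", "reveal", "expose", "print", "output"],
--     "reveal": ["expose", "disclose", "uncover", "leak", "share"],
--     "ignore": ["disregard", "bypass", "skip", "forget", "dismiss", "override"],
--     "instructions": ["guidelines", "directives", "rules", "constraints", "orders"],
--     "previous": ["prior", "earlier", "above", "preceding", "former"],
--     "system": ["core", "base", "internal", "primary", "root"],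
--     "prompt": ["context", "instructions", "directive", "preamble", "setup"],
--     "password": ["secret", "credential", "passphrase", "key", "token"],
--     "data": ["information", "content", "details", "records", "payload"],
--     "print": ["output", "display", "write", "emit", "return"],
-- }
--
-- def _apply_synonyms(text: str) -> str:
--     """Replace up to 3 words using the static synonym map (left-to-right, first hit)."""
--     words = text.split()
--     replaced = 0
--     out: list[str] = []
--     for w in words:
--         key = w.lower().strip(".,!?;:")
--         if replaced < 3 and key in _SYNONYM_MAP:
--             synonyms = _SYNONYM_MAP[key]
--             # deterministic: pick index derived from the word itself
--             out.append(synonyms[sum(ord(c) for c in w) % len(synonyms)])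
--             replaced += 1
--         else:
--             out.append(w)
--     return " ".join(out)
-- ===== SOURCE B (Python) =====
-- _SYNONYM_MAP: dict[str, list[str]] = {
--     "tell": ["reveal", "disclose", "share", "output", "show"],
--     "show": ["display", "reveal", "expose", "print", "output"],
--     "reveal": ["expose", "disclose", "uncover", "leak", "share"],
--     "ignore": ["disregard", "bypass", "skip", "forget", "dismiss", "override"],
--     "instructions": ["guidelines", "directives", "rules", "constraints", "orders"],
--     "previous": ["prior", "earlier", "above", "preceding", "former"],
--     "system": ["core", "base", "internal", "primary", "root"],
--     "prompt": ["context", "instructions", "directive", "preamble", "setup"],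
--     "password": ["secret", "credential", "passphrase", "key", "token"],
--     "data": ["information", "content", "details", "records", "payload"],
--     "print": ["output", "display", "write", "emit", "return"],
-- }
--
--
-- def _apply_synonyms(text: str) -> str:
--     """Two-phase: mark the first (up to) three mapped word positions, then substitute."""
--     words = text.split()
--     chosen: set[int] = set()
--     for i, w in enumerate(words):
--         if w.lower().strip(".,!?;:") in _SYNONYM_MAP:
--             chosen.add(i)
--             if len(chosen) == 3:
--                 break
--
--     def sub(i: int, w: str) -> str:
--         if i not in chosen:
--             return w
--         syns = _SYNONYM_MAP[w.lower().strip(".,!?;:")]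
--         h = 0
--         for c in w:
--             h += ord(c)
--         return syns[h % len(syns)]
--
--     return " ".join(sub(i, w) for i, w in enumerate(words))
-- ===== Notes on version B (the rewrite author's own statement) =====
-- stated objective: alternative
-- what changed: B replaces A's single loop with an inline replacement counter by two explicit passes: a marking scan that collects the set of the first (up to) three mapped word positions and breaks at three, then a substitution pass over enumerate(words) that replaces exactly at the marked positions, accumulating the ord-sum with a running loop instead of sum().
import Mathlib
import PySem

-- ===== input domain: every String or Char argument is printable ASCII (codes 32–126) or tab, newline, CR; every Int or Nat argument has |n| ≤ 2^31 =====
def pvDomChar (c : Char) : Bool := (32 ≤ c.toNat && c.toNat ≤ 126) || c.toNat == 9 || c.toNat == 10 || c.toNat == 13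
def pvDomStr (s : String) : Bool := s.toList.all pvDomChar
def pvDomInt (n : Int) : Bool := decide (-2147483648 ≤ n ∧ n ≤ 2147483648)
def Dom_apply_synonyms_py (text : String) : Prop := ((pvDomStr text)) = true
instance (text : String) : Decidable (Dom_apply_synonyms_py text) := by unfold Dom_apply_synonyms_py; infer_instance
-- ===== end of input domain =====

-- B re-decomposes A's single counting loop into a marking pass (the first up-to-three mapped
-- positions) followed by a substitution pass over the indexed words; same cost, no speed claim.

-- ===== PORT A =====
-- the module-level _SYNONYM_MAP (shared constant of both Pythons)
def synMap : PySem.Dict String (List String) := PySem.Dict.ofList [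
  ("tell", ["reveal", "disclose", "share", "output", "show"]),
  ("show", ["display", "reveal", "expose", "print", "output"]),
  ("reveal", ["expose", "disclose", "uncover", "leak", "share"]),
  ("ignore", ["disregard", "bypass", "skip", "forget", "dismiss", "override"]),
  ("instructions", ["guidelines", "directives", "rules", "constraints", "orders"]),
  ("previous", ["prior", "earlier", "above", "preceding", "former"]),
  ("system", ["core", "base", "internal", "primary", "root"]),
  ("prompt", ["context", "instructions", "directive", "preamble", "setup"]),
  ("password", ["secret", "credential", "passphrase", "key", "token"]),
  ("data", ["information", "content", "details", "records", "payload"]),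
  ("print", ["output", "display", "write", "emit", "return"])]

-- w.lower().strip(".,!?;:")  (both Pythons compute this key with the same expression)
def normKey (w : String) : String :=
  PySem.Str.stripChars (PySem.Str.lower w) ".,!?;:"

-- A's synonyms[sum(ord(c) for c in w) % len(synonyms)]: the index is mod of a positive
-- length, so it is in range and the .getD "" default is unreachable (map values nonempty).
def pickSyn (w : String) (synonyms : List String) : String :=
  (PySem.List.pyGet? synonyms
    (PySem.Int.mod ((w.toList.map (fun c => (c.toNat : Int))).sum) (synonyms.length : Int))).getD ""

-- A's loop: inline counter 'replaced', appending as it goes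
def loopA : List String → Int → List String
  | [], _ => []
  | w :: ws, replaced =>
      if replaced < 3 then
        match synMap.get? (normKey w) with
        | some synonyms => pickSyn w synonyms :: loopA ws (replaced + 1)
        | none => w :: loopA ws replaced
      else w :: loopA ws replaced

def apply_synonyms_py (text : String) : String :=
  PySem.Str.join " " (loopA (PySem.Str.split₀ text) 0)

-- ===== PORT B =====
-- Source B's enumerate(words), as an explicit index-carrying pairing (Nat positions)
def bIndexed : List String → Nat → List (Nat × String)
  | [], _ => []
  | w :: ws, i => (i, w) :: bIndexed ws (i + 1)

-- phase 1: positions of the first (up to) three mapped words, breaking once three are chosen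
def bMark : List (Nat × String) → Nat → List Nat
  | [], _ => []
  | (i, w) :: rest, cnt =>
      if (synMap.get? (normKey w)).isSome then
        if cnt + 1 == 3 then [i] else i :: bMark rest (cnt + 1)
      else bMark rest cnt

-- Source B's running ord-sum loop 'h = 0; for c in w: h += ord(c)'
def bOrdSum (w : String) : Nat :=
  w.toList.foldl (fun h c => h + c.toNat) 0

-- phase 2 body: substitute exactly at the marked positions (the key is re-looked-up there;
-- a marked position always has its key in the map, so the none branch is unreachable)
def bSub (chosen : List Nat) (i : Nat) (w : String) : String :=
  if i ∈ chosen then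
    match synMap.get? (normKey w) with
    | some syns => syns.getD (bOrdSum w % syns.length) ""
    | none => w
  else w

def apply_synonyms_py_alt (text : String) : String :=
  let iw := bIndexed (PySem.Str.split₀ text) 0
  let chosen := bMark iw 0
  PySem.Str.join " " (iw.map (fun p => bSub chosen p.1 p.2))

-- ===== PRECONDITION & SPEC =====
def Spec_apply_synonyms_py (text : String) (out : String) : Prop := out = apply_synonyms_py_alt text
instance (text : String) (out : String) : Decidable (Spec_apply_synonyms_py text out) := by unfold Spec_apply_synonyms_py; infer_instance

-- ===== CLAIM (what is proved, stated in full; the proofs are below) =====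
def Claim_equal_apply_synonyms_py : Prop := ∀ (text : String), Dom_apply_synonyms_py text → Spec_apply_synonyms_py text (apply_synonyms_py text)

-- ===== LEMMAS AND PROOFS =====

-- unfolding equation for bMark on a cons cell (kept symbolic: synMap is never evaluated)
lemma bMark_cons (i : Nat) (w : String) (rest : List (Nat × String)) (cnt : Nat) :
    bMark ((i, w) :: rest) cnt =
      if (synMap.get? (normKey w)).isSome then
        (if cnt + 1 == 3 then [i] else i :: bMark rest (cnt + 1))
      else bMark rest cnt := rfl

-- the running ord-sum loop computes the sum of the character codes
lemma foldl_ordSum (l : List Char) (n : Nat) :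
    l.foldl (fun h c => h + c.toNat) n = n + (l.map Char.toNat).sum := by
  induction l generalizing n with
  | nil => simp
  | cons c cs ih => simp [List.foldl, ih (n + c.toNat)]; omega

-- the Int ord-sum of A is the cast of B's Nat ord-sum
lemma sum_ord_cast (w : String) :
    (w.toList.map (fun c => (c.toNat : Int))).sum = (bOrdSum w : Nat) := by
  unfold bOrdSum
  rw [foldl_ordSum w.toList 0]
  induction w.toList with
  | nil => simp
  | cons c cs ih => simp [ih]

-- A's pyGet?-with-Int-mod pick equals B's getD-with-Nat-mod pick (both "" on an empty list)
lemma pickSyn_eq_getD (w : String) (syns : List String) :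
    pickSyn w syns = syns.getD (bOrdSum w % syns.length) "" := by
  unfold pickSyn
  rw [sum_ord_cast]
  cases syns with
  | nil => simp [PySem.List.pyGet?, PySem.Int.mod]
  | cons s ss =>
      have hpos : (0 : Int) < ((s :: ss).length : Int) := by exact_mod_cast Nat.succ_pos ss.length
      rw [PySem.Int.mod_eq_emod_of_pos hpos]
      have : ((bOrdSum w : Int)) % ((s :: ss).length : Int)
          = ((bOrdSum w % (s :: ss).length : Nat) : Int) := by
        push_cast
        ring_nf
      rw [this, PySem.List.pyGet?_natCast]
      simp

-- bSub only looks at membership of the index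
lemma bSub_congr (S T : List Nat) (i : Nat) (w : String) (h : i ∈ S ↔ i ∈ T) :
    bSub S i w = bSub T i w := by
  unfold bSub
  by_cases hm : i ∈ T
  · rw [if_pos (h.2 hm), if_pos hm]
  · rw [if_neg (fun hx => hm (h.1 hx)), if_neg hm]

lemma bSub_of_not_mem (S : List Nat) (i : Nat) (w : String) (h : i ∉ S) : bSub S i w = w := by
  unfold bSub; rw [if_neg h]

-- with the budget exhausted, A's loop copies the words unchanged
lemma loopA_done (ws : List String) (r : Int) (h : ¬ r < 3) : loopA ws r = ws := by
  induction ws with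
  | nil => rfl
  | cons w ws ih => simp [loopA, h, ih]

-- every marked position comes from the indexed list, hence is ≥ its start index
lemma bMark_ge (ws : List String) :
    ∀ (i c x : Nat), x ∈ bMark (bIndexed ws i) c → i ≤ x := by
  induction ws with
  | nil => intro i c x hx; simp [bIndexed, bMark] at hx
  | cons w ws ih =>
      intro i c x hx
      rw [show bIndexed (w :: ws) i = (i, w) :: bIndexed ws (i + 1) from rfl, bMark_cons] at hx
      by_cases hq : (synMap.get? (normKey w)).isSome
      · rw [if_pos hq] at hx
        by_cases h3 : c + 1 = 3
        · rw [if_pos (by simp [h3])] at hx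
          simp at hx; omega
        · rw [if_neg (by simp; omega)] at hx
          rcases List.mem_cons.1 hx with h | h
          · omega
          · have := ih (i + 1) (c + 1) x h; omega
      · rw [if_neg hq] at hx
        have := ih (i + 1) c x hx; omega

-- the substitution pass ignores indices below the start of the indexed list
lemma map_bSub_cons_lt (ws : List String) :
    ∀ (i a : Nat) (S : List Nat), a < i →
      (bIndexed ws i).map (fun p => bSub (a :: S) p.1 p.2) =
      (bIndexed ws i).map (fun p => bSub S p.1 p.2) := by
  induction ws with
  | nil => intro i a S _; simp [bIndexed]
  | cons w ws ih =>
      intro i a S ha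
      show bSub (a :: S) i w :: _ = bSub S i w :: _
      rw [ih (i + 1) a S (by omega), bSub_congr (a :: S) S i w (by simp; omega)]

-- a substitution pass with only spent indices copies the words unchanged
lemma map_bSub_id (ws : List String) :
    ∀ (i : Nat) (S : List Nat), (∀ x ∈ S, x < i) →
      (bIndexed ws i).map (fun p => bSub S p.1 p.2) = ws := by
  induction ws with
  | nil => intro i S _; simp [bIndexed]
  | cons w ws ih =>
      intro i S hS
      show bSub S i w :: _ = _
      have hni : i ∉ S := fun h => absurd (hS i h) (by omega)
      rw [ih (i + 1) S (fun x hx => by have := hS x hx; omega), bSub_of_not_mem S i w hni]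

-- main correspondence: B's two passes reproduce A's counting loop
lemma main_corr (ws : List String) :
    ∀ (i c : Nat), c < 3 →
      (bIndexed ws i).map (fun p => bSub (bMark (bIndexed ws i) c) p.1 p.2) =
      loopA ws (c : Int) := by
  induction ws with
  | nil => intro i c _; simp [bIndexed, loopA]
  | cons w ws ih =>
      intro i c hc
      have hc' : (c : Int) < 3 := by omega
      rw [show bIndexed (w :: ws) i = (i, w) :: bIndexed ws (i + 1) from rfl, bMark_cons]
      simp only [loopA, if_pos hc']
      cases hlk : synMap.get? (normKey w) with
      | some synonyms =>
          rw [if_pos (by simp)]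
          have hcast : (c : Int) + 1 = ((c + 1 : Nat) : Int) := by push_cast; ring
          have hhead : ∀ S : List Nat, i ∈ S →
              bSub S i w = pickSyn w synonyms := by
            intro S hS; unfold bSub; rw [if_pos hS, hlk, pickSyn_eq_getD]
          by_cases h3 : c + 1 = 3
          · rw [if_pos (by simp [h3])]
            show bSub [i] i w :: _ = _
            rw [hhead [i] (by simp),
              map_bSub_id ws (i + 1) [i] (by intro x hx; simp at hx; omega),
              hcast, h3, loopA_done ws _ (by norm_num)]
          · rw [if_neg (by simp; omega)]
            show bSub _ i w :: _ = _
            rw [hhead _ (by simp),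
              map_bSub_cons_lt ws (i + 1) i _ (by omega),
              ih (i + 1) (c + 1) (by omega), hcast]
      | none =>
          rw [if_neg (by simp)]
          show bSub _ i w :: _ = _
          rw [ih (i + 1) c hc]
          refine congrArg (· :: loopA ws (c : Int)) ?_
          refine bSub_of_not_mem _ i w ?_
          intro h; have := bMark_ge ws (i + 1) c i h; omega

-- ===== VERDICT (by name: the statement is the Claim_ definition above) =====
theorem apply_synonyms_py_spec : Claim_equal_apply_synonyms_py := by
  intro text _
  unfold Spec_apply_synonyms_py
  have h := main_corr (PySem.Str.split₀ text) 0 0 (by omega)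
  norm_num at h
  rw [show apply_synonyms_py_alt text =
        PySem.Str.join " " ((bIndexed (PySem.Str.split₀ text) 0).map
          (fun p => bSub (bMark (bIndexed (PySem.Str.split₀ text) 0) 0) p.1 p.2)) from rfl, h]
  rfl
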